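-- pv_equiv track=rewrite | github.com/amandaburger/LeetCode | python/beautifulIndex.py | beautifulIndices2
-- ===== SOURCE A (Python) =====
-- def beautifulIndices2(s,a,b,k):
--     def prefix(a):
--         m = len(a)
--         table = [0] * m
--         j = 0
--
--         for i in range(1, m):
--             while j > 0 and a[i] != a[j]:
--                 j = table[j - 1]
--
--             if a[i] == a[j]:
--                 j += 1
--
--             table[i] = j
--
--         return table
--
--     def kmp_search(text, a):
--         n, m = len(text), len(a)
--         if m == 0:
--             return list(range(n))
--
--         table = prefix(a)
--         result = []
--         j = 0
--
--         for i in range(n):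
--             while j > 0 and text[i] != a[j]:
--                 j = table[j - 1]
--
--             if text[i] == a[j]:
--                 j += 1
--
--             if j == m:
--                 result.append(i - m + 1)
--                 j = table[j - 1]
--
--         return result
--
--     first, second = kmp_search(s, a), kmp_search(s, b)
--     i = j = 0
--     result = []
--
--     while i < len(first) and j < len(second):
--         if abs(first[i] - second[j]) <= k:
--             result.append(first[i])
--             i += 1
--         elif second[j] - first[i] > k:
--             i += 1
--         else:
--             j += 1
--
--     return result
-- ===== SOURCE B (Python) =====
-- def beautifulIndices2(s, a, b, k):
--     def occurrences(text, pat):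
--         if not pat:
--             return list(range(len(text)))
--         m = len(pat)
--         return [i for i in range(len(text) - m + 1) if text[i:i + m] == pat]
--
--     first = occurrences(s, a)
--     second = occurrences(s, b)
--     return [i for i in first if any(abs(i - j) <= k for j in second)]
-- ===== Notes on version B (the rewrite author's own statement) =====
-- stated objective: simpler
-- what changed: Replaced the hand-built KMP automaton (prefix-function table + stateful scan) by a direct slice-comparison scan over all start positions (special-casing the empty pattern as range(len(s)) like A does), and replaced the two-pointer merge of the two occurrence lists by a per-occurrence existence test (keep i iff some b-occurrence lies within distance k).
import Mathlib
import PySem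

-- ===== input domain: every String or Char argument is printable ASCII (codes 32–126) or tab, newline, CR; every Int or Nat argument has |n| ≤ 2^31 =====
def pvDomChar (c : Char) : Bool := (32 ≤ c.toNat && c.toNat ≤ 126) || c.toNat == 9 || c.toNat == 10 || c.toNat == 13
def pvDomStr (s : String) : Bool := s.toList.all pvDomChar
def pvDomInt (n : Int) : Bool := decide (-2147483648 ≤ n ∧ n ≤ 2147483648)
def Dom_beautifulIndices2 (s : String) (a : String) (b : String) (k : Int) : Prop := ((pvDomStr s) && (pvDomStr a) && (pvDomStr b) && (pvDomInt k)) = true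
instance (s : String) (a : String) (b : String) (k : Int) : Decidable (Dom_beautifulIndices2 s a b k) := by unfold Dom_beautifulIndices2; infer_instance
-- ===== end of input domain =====

-- B replaces the KMP automaton by a direct slice-comparison scan over all start positions and the
-- two-pointer merge by a per-occurrence existence test (objective: simpler).


-- ===== PORT A =====
-- the inner `while j > 0 and x != pat[j]: j = table[j-1]` of A; the fuel argument (always called
-- with fuel = j) only makes the recursion structural: on the tables A builds, j strictly
-- decreases at every step, so with fuel = j the first branch is never reached.
def pvJump (c : Char) (p : List Char) (tab : List Nat) : Nat → Nat → Nat
  | 0, j => j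
  | fuel+1, j => if 0 < j ∧ ¬ c = p.getD j ' ' then pvJump c p tab fuel (tab.getD (j-1) 0) else j

-- `prefix(a)` of A: the failure table, built over i = 1 .. m-1
def pvPrefix (p : List Char) : List Nat :=
  (List.range' 1 (p.length - 1)).foldl
    (fun (st : List Nat × Nat) i =>
      let c := p.getD i ' '
      let j1 := pvJump c p st.1 st.2 st.2
      let j2 := if c = p.getD j1 ' ' then j1 + 1 else j1
      (st.1.set i j2, j2))
    (List.replicate p.length 0, 0) |>.1

-- `kmp_search(text, a)` of A
def pvKmpSearch (t p : List Char) : List Int :=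
  if p.length = 0 then PySem.List.pyRange 0 (t.length : Int) 1
  else
    let tab := pvPrefix p
    ((List.range t.length).foldl
      (fun (st : List Int × Nat) i =>
        let c := t.getD i ' '
        let j1 := pvJump c p tab st.2 st.2
        let j2 := if c = p.getD j1 ' ' then j1 + 1 else j1
        if j2 = p.length then (st.1 ++ [(i : Int) - p.length + 1], tab.getD (p.length - 1) 0)
        else (st.1, j2))
      ([], 0)).1

-- the final two-pointer while loop of A (i += 1 / j += 1 consume the heads); the fuel argument
-- (called with the combined length) only makes the recursion structural, it is never exhausted
def pvMergeF (k : Int) : Nat → List Int → List Int → List Int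
  | _, [], _ => []
  | _, _ :: _, [] => []
  | 0, _ :: _, _ :: _ => []
  | fuel+1, x :: xs, y :: ys =>
    if |x - y| ≤ k then x :: pvMergeF k fuel xs (y :: ys)
    else if y - x > k then pvMergeF k fuel xs (y :: ys)
    else pvMergeF k fuel (x :: xs) ys

def pvMerge (k : Int) (xs ys : List Int) : List Int := pvMergeF k (xs.length + ys.length) xs ys

def beautifulIndices2 (s : String) (a : String) (b : String) (k : Int) : List Int :=
  pvMerge k (pvKmpSearch s.toList a.toList) (pvKmpSearch s.toList b.toList)

-- ===== PORT B =====
-- `occurrences(text, pat)` of B: slice comparison at every start position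
def pvOcc (t p : List Char) : List Int :=
  if p.isEmpty then PySem.List.pyRange 0 (t.length : Int) 1
  else (PySem.List.pyRange 0 ((t.length : Int) - p.length + 1) 1).filter
    (fun i => PySem.List.slice t (some i) (some (i + p.length)) = p)

def beautifulIndices2_alt (s : String) (a : String) (b : String) (k : Int) : List Int :=
  let first := pvOcc s.toList a.toList
  let second := pvOcc s.toList b.toList
  first.filter (fun i => second.any (fun j => decide (|i - j| ≤ k)))

-- ===== PRECONDITION & SPEC =====
def Spec_beautifulIndices2 (s : String) (a : String) (b : String) (k : Int) (out : List Int) : Prop := out = beautifulIndices2_alt s a b k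
instance (s : String) (a : String) (b : String) (k : Int) (out : List Int) : Decidable (Spec_beautifulIndices2 s a b k out) := by unfold Spec_beautifulIndices2; infer_instance

-- ===== CLAIM (what is proved, stated in full; the proofs are below) =====
def Claim_equal_beautifulIndices2 : Prop := ∀ (s : String) (a : String) (b : String) (k : Int), Dom_beautifulIndices2 s a b k → Spec_beautifulIndices2 s a b k (beautifulIndices2 s a b k)

-- ===== LEMMAS AND PROOFS =====

-- `fullB p u` = length of the longest prefix of p (of length ≤ |p|) that is a suffix of u
def fullB (p u : List Char) : Nat := Nat.findGreatest (fun l => p.take l <:+ u) p.length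
-- same, but restricted to length < |p| (the value KMP carries between text positions)
def sbB (p u : List Char) : Nat := Nat.findGreatest (fun l => p.take l <:+ u) (p.length - 1)
-- proper border length of p.take i (the value table[i-1] holds)
def bordB (p : List Char) (i : Nat) : Nat := Nat.findGreatest (fun l => p.take l <:+ p.take i) (i - 1)
-- automaton transition: longest prefix of p that is a suffix of p.take j ++ [c]
def deltaB (p : List Char) (j : Nat) (c : Char) : Nat := Nat.findGreatest (fun l => p.take l <:+ p.take j ++ [c]) p.length

lemma fg_congr {P Q : Nat → Prop} [DecidablePred P] [DecidablePred Q] {b : Nat}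
    (h : ∀ k, k ≤ b → (P k ↔ Q k)) : Nat.findGreatest P b = Nat.findGreatest Q b := by
  induction b with
  | zero => rfl
  | succ n ih =>
    rw [Nat.findGreatest_succ, Nat.findGreatest_succ]
    by_cases hP : P (n+1)
    · rw [if_pos hP, if_pos ((h _ le_rfl).mp hP)]
    · rw [if_neg hP, if_neg (fun hq => hP ((h _ le_rfl).mpr hq))]
      exact ih (fun k hk => h k (Nat.le_succ_of_le hk))

lemma fg_le {P : Nat → Prop} [DecidablePred P] {b c : Nat}
    (h : ∀ l, 0 < l → l ≤ b → P l → l ≤ c) : Nat.findGreatest P b ≤ c := by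
  rcases Nat.eq_zero_or_pos (Nat.findGreatest P b) with h0 | h0
  · omega
  · exact h _ h0 (Nat.findGreatest_le b) (Nat.findGreatest_of_ne_zero rfl (by omega))

lemma fg_pred {P : Nat → Prop} [DecidablePred P] {b : Nat} (h0 : P 0) : P (Nat.findGreatest P b) := by
  rcases Nat.eq_zero_or_pos (Nat.findGreatest P b) with h | h
  · rw [h]; exact h0
  · exact Nat.findGreatest_of_ne_zero rfl (by omega)

lemma take_len {p : List Char} {l : Nat} (h : l ≤ p.length) : (p.take l).length = l := by
  simp [List.length_take]; omega

lemma suffix_align {u x y : List Char} (hx : x <:+ u) (hy : y <:+ u) (h : x.length ≤ y.length) :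
    x <:+ y := by
  rw [← List.reverse_prefix] at hx hy ⊢
  exact List.prefix_of_prefix_length_le hx hy (by simpa using h)

lemma take_snoc {p : List Char} {l : Nat} (h : l < p.length) :
    p.take (l+1) = p.take l ++ [p.getD l ' '] := by
  rw [List.take_succ_eq_append_getElem h, List.getD_eq_getElem p ' ' h]

lemma snoc_suffix_iff {x v : List Char} {a c : Char} :
    (x ++ [a]) <:+ (v ++ [c]) ↔ x <:+ v ∧ a = c := by
  rw [← List.reverse_prefix, List.reverse_append, List.reverse_append]
  simp only [List.reverse_cons, List.reverse_nil, List.nil_append, List.singleton_append,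
    List.cons_prefix_cons]
  rw [List.reverse_prefix]
  tauto

lemma sufP_snoc_iff {p v : List Char} {c : Char} {l : Nat} (h0 : 0 < l) (hm : l ≤ p.length) :
    (p.take l <:+ v ++ [c]) ↔ (p.getD (l-1) ' ' = c ∧ p.take (l-1) <:+ v) := by
  have h1 : l - 1 < p.length := by omega
  have : p.take l = p.take (l-1) ++ [p.getD (l-1) ' '] := by
    have := take_snoc h1
    rwa [Nat.sub_add_cancel h0] at this
  rw [this, snoc_suffix_iff]
  tauto

-- the central "shift" lemma: reading c after u is the same as reading c after p.take b,
-- where b is the longest (relevant) prefix-suffix length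
lemma sufP_shift {p u : List Char} {b : Nat} (c : Char)
    (hb : p.take b <:+ u) (hbm : b < p.length)
    (hmax : ∀ r, r < p.length → p.take r <:+ u → p.getD r ' ' = c → r ≤ b) :
    ∀ l, l ≤ p.length → ((p.take l <:+ u ++ [c]) ↔ (p.take l <:+ p.take b ++ [c])) := by
  intro l hl
  rcases Nat.eq_zero_or_pos l with h0 | h0
  · subst h0; simp
  rw [sufP_snoc_iff h0 hl, sufP_snoc_iff h0 hl]
  constructor
  · rintro ⟨hc, hs⟩
    refine ⟨hc, ?_⟩
    have hr : l - 1 ≤ b := hmax _ (by omega) hs hc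
    exact suffix_align hs hb (by rw [take_len (by omega), take_len (le_of_lt hbm)]; exact hr)
  · rintro ⟨hc, hs⟩
    exact ⟨hc, hs.trans hb⟩

lemma delta_self_succ {p : List Char} {j : Nat} {c : Char} (hj : j < p.length)
    (hc : c = p.getD j ' ') : deltaB p j c = j + 1 := by
  unfold deltaB
  have hself : p.take (j+1) <:+ p.take j ++ [c] := by
    rw [take_snoc hj, ← hc]
  apply Nat.le_antisymm
  · apply fg_le
    intro l hl0 hlm hP
    have := hP.length_le
    rw [take_len hlm] at this
    simpa [take_len (le_of_lt hj)] using this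
  · exact Nat.le_findGreatest (by omega) hself

lemma delta_zero {p : List Char} {c : Char} (hc : ¬ c = p.getD 0 ' ') :
    deltaB p 0 c = 0 := by
  unfold deltaB
  apply Nat.le_zero.mp
  apply fg_le
  intro l hl0 hlm hP
  rw [sufP_snoc_iff hl0 hlm] at hP
  obtain ⟨hc', hs⟩ := hP
  have : l - 1 = 0 := by
    have := hs.length_le
    rw [take_len (by omega : l - 1 ≤ p.length)] at this
    simpa using this
  rw [this] at hc'
  exact absurd hc'.symm hc

lemma bord_le {p : List Char} {i : Nat} : bordB p i ≤ i - 1 := by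
  unfold bordB; exact Nat.findGreatest_le _

lemma sb_le {p u : List Char} : sbB p u ≤ p.length - 1 := by
  unfold sbB; exact Nat.findGreatest_le _

lemma bord_suffix {p : List Char} {i : Nat} : p.take (bordB p i) <:+ p.take i := by
  unfold bordB
  exact fg_pred (P := fun l => p.take l <:+ p.take i)
    (by show List.take 0 p <:+ _; rw [List.take_zero]; exact List.nil_suffix)

lemma sb_suffix {p u : List Char} : p.take (sbB p u) <:+ u := by
  unfold sbB
  exact fg_pred (P := fun l => p.take l <:+ u)
    (by show List.take 0 p <:+ _; rw [List.take_zero]; exact List.nil_suffix)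

lemma delta_shift {p : List Char} {j : Nat} {c : Char} (hj0 : 0 < j) (hjm : j < p.length)
    (hc : ¬ c = p.getD j ' ') : deltaB p j c = deltaB p (bordB p j) c := by
  unfold deltaB
  apply fg_congr
  intro l hl
  refine sufP_shift c bord_suffix (by have := bord_le (p := p) (i := j); omega) ?_ l hl
  intro r hr hs hrc
  have hrj : r ≤ j := by
    have := hs.length_le
    rw [take_len (le_of_lt hr), take_len (le_of_lt hjm)] at this
    exact this
  have hrne : r ≠ j := fun h => hc (h ▸ hrc.symm)
  show r ≤ Nat.findGreatest _ _
  exact Nat.le_findGreatest (by omega) hs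

lemma full_append {p u : List Char} {c : Char} (hm : 0 < p.length) :
    fullB p (u ++ [c]) = deltaB p (sbB p u) c := by
  unfold fullB deltaB
  apply fg_congr
  intro l hl
  refine sufP_shift c sb_suffix (by have := sb_le (p := p) (u := u); omega) ?_ l hl
  intro r hr hs _
  show r ≤ Nat.findGreatest _ _
  exact Nat.le_findGreatest (by omega) hs

lemma bord_succ {p : List Char} {i : Nat} (hi0 : 0 < i) (him : i < p.length) :
    bordB p (i+1) = deltaB p (bordB p i) (p.getD i ' ') := by
  have hbi : bordB p i ≤ i - 1 := bord_le
  set c := p.getD i ' ' with hc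
  apply Nat.le_antisymm
  · apply fg_le
    intro l hl0 hl hP
    rw [take_snoc him] at hP
    rw [sufP_snoc_iff hl0 (by omega)] at hP
    obtain ⟨hlc, hs⟩ := hP
    have hrb : l - 1 ≤ bordB p i := Nat.le_findGreatest (by omega) hs
    have hs' : p.take (l-1) <:+ p.take (bordB p i) :=
      suffix_align hs bord_suffix (by rw [take_len (by omega), take_len (by omega)]; exact hrb)
    have : p.take l <:+ p.take (bordB p i) ++ [c] := by
      rw [sufP_snoc_iff hl0 (by omega)]
      exact ⟨hlc, hs'⟩
    exact Nat.le_findGreatest (by omega) this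
  · apply fg_le
    intro l hl0 hl hP
    have hlen : l ≤ bordB p i + 1 := by
      have := hP.length_le
      rw [take_len hl] at this
      simpa [take_len (by omega : bordB p i ≤ p.length)] using this
    rw [sufP_snoc_iff hl0 hl] at hP
    obtain ⟨hlc, hs⟩ := hP
    have : p.take l <:+ p.take (i+1) := by
      rw [take_snoc him, sufP_snoc_iff hl0 (by omega)]
      exact ⟨hlc, hs.trans bord_suffix⟩
    exact Nat.le_findGreatest (by omega) this

lemma full_le {p u : List Char} : fullB p u ≤ p.length := by
  unfold fullB; exact Nat.findGreatest_le _

lemma sb_of_full_lt {p u : List Char} (h : fullB p u < p.length) : sbB p u = fullB p u := by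
  have h1 : sbB p u ≤ fullB p u := by
    unfold sbB fullB
    exact Nat.findGreatest_mono_right _ (by omega)
  have h2 : fullB p u ≤ sbB p u := by
    rcases Nat.eq_zero_or_pos (fullB p u) with h0 | h0
    · omega
    · have hne : fullB p u ≠ 0 := by omega
      have hp : p.take (fullB p u) <:+ u :=
        Nat.findGreatest_of_ne_zero (n := p.length) rfl hne
      show fullB p u ≤ Nat.findGreatest (fun l => p.take l <:+ u) (p.length - 1)
      exact Nat.le_findGreatest (by omega) hp
  omega

lemma full_eq_iff {p u : List Char} (hm : 0 < p.length) :
    fullB p u = p.length ↔ p <:+ u := by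
  unfold fullB
  constructor
  · intro h
    have := Nat.findGreatest_of_ne_zero h (by omega)
    rwa [List.take_length] at this
  · intro h
    refine Nat.le_antisymm (Nat.findGreatest_le _) (Nat.le_findGreatest le_rfl ?_)
    rwa [List.take_length]

lemma sb_of_full_eq {p u : List Char} (hm : 0 < p.length) (h : fullB p u = p.length) :
    sbB p u = bordB p p.length := by
  have hsuf : p <:+ u := (full_eq_iff hm).mp h
  unfold sbB bordB
  rw [List.take_length]
  apply fg_congr
  intro l hl
  constructor
  · intro hs
    exact suffix_align hs hsuf (by rw [take_len (by omega)]; omega)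
  · intro hs
    exact hs.trans hsuf

lemma sb_nil {p : List Char} : sbB p [] = 0 := by
  apply Nat.le_zero.mp
  apply fg_le
  intro l hl0 hl hP
  have := hP.length_le
  rw [take_len (by omega)] at this
  simpa using this

-- correctness of pvJump + the following increment: it computes the automaton transition deltaB
lemma jump_correct {p : List Char} {tab : List Nat} {c : Char} :
    ∀ j fuel, j ≤ fuel → j < p.length →
    (∀ r, 1 ≤ r → r ≤ j → tab.getD (r-1) 0 = bordB p r) →
    (if c = p.getD (pvJump c p tab fuel j) ' ' then pvJump c p tab fuel j + 1
     else pvJump c p tab fuel j) = deltaB p j c := by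
  intro j
  induction j using Nat.strong_induction_on with
  | _ j ih =>
    intro fuel hfuel hjm htab
    by_cases h : 0 < j ∧ ¬ c = p.getD j ' '
    · obtain ⟨hj0, hcne⟩ := h
      cases fuel with
      | zero => omega
      | succ f =>
        have hstep : pvJump c p tab (f+1) j = pvJump c p tab f (tab.getD (j-1) 0) := by
          simp only [pvJump]
          rw [if_pos ⟨hj0, hcne⟩]
        have htj : tab.getD (j-1) 0 = bordB p j := htab j hj0 le_rfl
        have hblt : bordB p j < j := by have := bord_le (p := p) (i := j); omega
        rw [hstep, htj]
        rw [ih (bordB p j) hblt f (by omega) (by omega)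
          (fun r h1 h2 => htab r h1 (by omega))]
        exact (delta_shift hj0 hjm hcne).symm
    · have hid : pvJump c p tab fuel j = j := by
        cases fuel with
        | zero => rfl
        | succ f =>
          simp only [pvJump]
          rw [if_neg h]
      rw [hid]
      by_cases hc : c = p.getD j ' '
      · rw [if_pos hc]
        exact (delta_self_succ hjm hc).symm
      · have hj0 : j = 0 := by
          rcases Nat.eq_zero_or_pos j with h0 | h0
          · exact h0
          · exact absurd ⟨h0, hc⟩ h
        rw [if_neg hc, hj0]
        subst hj0
        exact (delta_zero hc).symm

-- correctness of the failure table built by pvPrefix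
def pvPrefStep (p : List Char) (st : List Nat × Nat) (i : Nat) : List Nat × Nat :=
  let c := p.getD i ' '
  let j1 := pvJump c p st.1 st.2 st.2
  let j2 := if c = p.getD j1 ' ' then j1 + 1 else j1
  (st.1.set i j2, j2)

lemma pvPrefix_eq (p : List Char) :
    pvPrefix p = ((List.range' 1 (p.length - 1)).foldl (pvPrefStep p) (List.replicate p.length 0, 0)).1 := rfl

lemma prefix_fold_invariant {p : List Char} (hm : 0 < p.length) :
    ∀ n, n ≤ p.length - 1 →
    (((List.range' 1 n).foldl (pvPrefStep p) (List.replicate p.length 0, 0)).1.length = p.length) ∧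
    (((List.range' 1 n).foldl (pvPrefStep p) (List.replicate p.length 0, 0)).2 = bordB p (n+1)) ∧
    (∀ r, 1 ≤ r → r ≤ n+1 →
      ((List.range' 1 n).foldl (pvPrefStep p) (List.replicate p.length 0, 0)).1.getD (r-1) 0 = bordB p r) := by
  intro n
  induction n with
  | zero =>
    intro _
    refine ⟨by simp, ?_, ?_⟩
    · show (0 : Nat) = bordB p 1
      unfold bordB
      simp
    · intro r h1 h2
      have hr : r = 1 := by omega
      subst hr
      show (List.replicate p.length 0).getD 0 0 = bordB p 1
      rw [List.getD_eq_getElem (List.replicate p.length 0) 0 (by simpa using hm)]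
      unfold bordB
      simp
  | succ n ihn =>
    intro hn1
    have hn : n ≤ p.length - 1 := by omega
    obtain ⟨ihlen, ihsnd, ihent⟩ := ihn hn
    have hrange : List.range' 1 (n+1) = List.range' 1 n ++ [n+1] := by
      rw [List.range'_concat]
      simp [Nat.add_comm]
    rw [hrange, List.foldl_append]
    simp only [List.foldl_cons, List.foldl_nil]
    set tab := ((List.range' 1 n).foldl (pvPrefStep p) (List.replicate p.length 0, 0)).1 with htabdef
    have hbm : bordB p (n+1) < p.length := by
      have := bord_le (p := p) (i := n+1); omega
    have hi1 : n + 1 < p.length := by omega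
    have htab : ∀ r, 1 ≤ r → r ≤ bordB p (n+1) → tab.getD (r-1) 0 = bordB p r := by
      intro r h1 h2
      have := bord_le (p := p) (i := n+1)
      exact ihent r h1 (by omega)
    have hjump := jump_correct (p := p) (tab := tab) (c := p.getD (n+1) ' ')
      (bordB p (n+1)) (bordB p (n+1)) le_rfl hbm htab
    have hstep : pvPrefStep p (((List.range' 1 n).foldl (pvPrefStep p) (List.replicate p.length 0, 0))) (n+1) =
        (tab.set (n+1) (bordB p (n+2)), bordB p (n+2)) := by
      show (tab.set (n+1) _, _) = _
      rw [ihsnd]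
      rw [hjump]
      rw [(bord_succ (i := n+1) (by omega) hi1).symm]
    rw [hstep]
    refine ⟨by simp [ihlen], rfl, ?_⟩
    intro r h1 h2
    rcases Nat.lt_or_ge r (n+2) with hr | hr
    · rw [List.getD_eq_getElem?_getD, List.getElem?_set_ne (by omega), ← List.getD_eq_getElem?_getD]
      exact ihent r h1 (by omega)
    · have hre : r = n + 2 := by omega
      subst hre
      have hlen' : n + 1 < tab.length := by rw [ihlen]; omega
      rw [List.getD_eq_getElem?_getD]
      have h21 : (n + 2 : Nat) - 1 = n + 1 := by omega
      rw [h21, List.getElem?_set_self hlen']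
      simp

lemma prefix_correct {p : List Char} (hm : 0 < p.length) :
    ∀ r, 1 ≤ r → r ≤ p.length → (pvPrefix p).getD (r-1) 0 = bordB p r := by
  intro r h1 h2
  rw [pvPrefix_eq]
  exact (prefix_fold_invariant hm (p.length - 1) le_rfl).2.2 r h1 (by omega)

lemma take_snoc_getD {t : List Char} {n : Nat} (h : n < t.length) :
    t.take (n+1) = t.take n ++ [t.getD n ' '] := take_snoc h

-- the text-scanning fold of kmp_search computes exactly the end positions of matches
lemma search_fold {t p : List Char} (hm : 0 < p.length) :
    ∀ n, n ≤ t.length →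
    ((List.range n).foldl
      (fun (st : List Int × Nat) i =>
        let c := t.getD i ' '
        let j1 := pvJump c p (pvPrefix p) st.2 st.2
        let j2 := if c = p.getD j1 ' ' then j1 + 1 else j1
        if j2 = p.length then (st.1 ++ [(i : Int) - p.length + 1], (pvPrefix p).getD (p.length - 1) 0)
        else (st.1, j2))
      ([], 0)) =
    (((List.range n).filter (fun i => decide (p <:+ t.take (i+1)))).map
       (fun i : Nat => (i : Int) - p.length + 1),
     sbB p (t.take n)) := by
  intro n
  induction n with
  | zero =>
    intro _
    simp only [List.range_zero, List.foldl_nil, List.filter_nil, List.map_nil, List.take_zero]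
    rw [sb_nil]
  | succ n ihn =>
    intro hn1
    have hn : n ≤ t.length := by omega
    have hlt : n < t.length := by omega
    rw [List.range_succ, List.foldl_append, ihn hn]
    simp only [List.foldl_cons, List.foldl_nil]
    have hsbm : sbB p (t.take n) < p.length := by
      have := sb_le (p := p) (u := t.take n); omega
    have htab : ∀ r, 1 ≤ r → r ≤ sbB p (t.take n) → (pvPrefix p).getD (r-1) 0 = bordB p r := by
      intro r h1 h2
      exact prefix_correct hm r h1 (by omega)
    have hjump := jump_correct (p := p) (tab := pvPrefix p) (c := t.getD n ' ')
      (sbB p (t.take n)) (sbB p (t.take n)) le_rfl hsbm htab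
    rw [hjump]
    have hdelta : deltaB p (sbB p (t.take n)) (t.getD n ' ') = fullB p (t.take (n+1)) := by
      rw [← full_append hm, ← take_snoc_getD hlt]
    rw [hdelta]
    by_cases hocc : p <:+ t.take (n+1)
    · have hfull : fullB p (t.take (n+1)) = p.length := (full_eq_iff hm).mpr hocc
      rw [if_pos hfull]
      have hsb : sbB p (t.take (n+1)) = bordB p p.length := sb_of_full_eq hm hfull
      rw [hsb, prefix_correct hm p.length (by omega) le_rfl]
      rw [List.filter_append, List.map_append]
      simp [hocc]
    · have hfull : fullB p (t.take (n+1)) ≠ p.length := fun h => hocc ((full_eq_iff hm).mp h)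
      rw [if_neg hfull]
      have hsb : sbB p (t.take (n+1)) = fullB p (t.take (n+1)) :=
        sb_of_full_lt (by have := full_le (p := p) (u := t.take (n+1)); omega)
      rw [← hsb, List.filter_append, List.map_append]
      simp [hocc]

lemma suffix_take_iff {t p : List Char} {x : Nat} (h : x + p.length ≤ t.length) :
    p <:+ t.take (x + p.length) ↔ (t.drop x).take p.length = p := by
  have hdt : (t.take (x + p.length)).drop x = (t.drop x).take p.length := by
    rw [List.drop_take]
    congr 1
    omega
  constructor
  · intro hs
    have he := List.suffix_iff_eq_drop.mp hs
    rw [List.length_take] at he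
    have hx : min (x + p.length) t.length - p.length = x := by omega
    rw [hx] at he
    rw [← he] at hdt
    exact hdt.symm
  · intro he
    have hsf : (t.take (x + p.length)).drop x <:+ t.take (x + p.length) := List.drop_suffix _ _
    rw [hdt, he] at hsf
    exact hsf

-- reindex end positions of matches (KMP reports i - m + 1 at end index i) to start positions
lemma kmp_list_eq_occ {t p : List Char} (hm : 0 < p.length) :
    ((List.range t.length).filter (fun i => decide (p <:+ t.take (i+1)))).map
      (fun i : Nat => (i : Int) - p.length + 1) = pvOcc t p := by
  have hpe : ¬ p.isEmpty = true := by
    cases p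
    · simp at hm
    · simp
  unfold pvOcc
  rw [if_neg hpe]
  by_cases hn : t.length < p.length
  · have hL : (List.range t.length).filter (fun i => decide (p <:+ t.take (i+1))) = [] := by
      rw [List.filter_eq_nil_iff]
      intro i hi hdec
      rw [decide_eq_true_eq] at hdec
      have h1 := hdec.length_le
      rw [List.length_take] at h1
      have h2 := List.mem_range.mp hi
      omega
    have h0 : ((t.length : Int) - ↑p.length + 1).toNat = 0 := by omega
    rw [hL, PySem.List.pyRange_zero, h0]
    simp
  · rw [Nat.not_lt] at hn
    have hcast : ((t.length : Int) - ↑p.length + 1) = ((t.length - p.length + 1 : Nat) : Int) := by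
      omega
    rw [hcast, PySem.List.pyRange_zero_nat, List.filter_map]
    rw [List.range_eq_range']
    have harith : p.length - 1 + (t.length - p.length + 1) = t.length := by omega
    have hsplit : List.range' 0 t.length =
        List.range' 0 (p.length - 1) ++ List.range' (p.length - 1) (t.length - p.length + 1) := by
      have h2 := List.range'_append_1 (s := 0) (m := p.length - 1) (n := t.length - p.length + 1)
      rw [Nat.zero_add, harith] at h2
      exact h2.symm
    rw [hsplit, List.filter_append]
    have hnil : (List.range' 0 (p.length - 1)).filter (fun i => decide (p <:+ t.take (i+1))) = [] := by
      rw [List.filter_eq_nil_iff]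
      intro i hi hdec
      rw [decide_eq_true_eq] at hdec
      have h3 := hdec.length_le
      rw [List.length_take] at h3
      have h4 := (List.mem_range'_1.mp hi).2
      omega
    rw [hnil, List.nil_append, List.range'_eq_map_range, List.filter_map, List.map_map]
    have hq : ∀ x ∈ List.range (t.length - p.length + 1),
        ((fun i => decide (p <:+ t.take (i+1))) ∘ (fun x => p.length - 1 + x)) x =
        ((fun i => decide (PySem.List.slice t (some i) (some (i + ↑p.length)) = p)) ∘ (fun k : Nat => (k : Int))) x := by
      intro x hx
      have hxn := List.mem_range.mp hx
      simp only [Function.comp]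
      have hidx : p.length - 1 + x + 1 = x + p.length := by omega
      rw [hidx]
      have hsl : PySem.List.slice t (some (x : Int)) (some ((x : Int) + ↑p.length)) = (t.drop x).take p.length :=
        PySem.List.slice_natCast_add t x p.length
      rw [hsl]
      rw [decide_eq_decide]
      rw [suffix_take_iff (by omega)]
    rw [List.filter_congr hq]
    apply List.map_congr_left
    intro x hx
    simp only [Function.comp]
    have hxn := List.mem_range.mp (List.mem_of_mem_filter hx)
    omega

-- the occurrence lists agree: KMP = slice scan
lemma kmp_eq_occ (t p : List Char) : pvKmpSearch t p = pvOcc t p := by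
  by_cases hm : p.length = 0
  · have hpe : p.isEmpty = true := by
      cases p
      · rfl
      · simp at hm
    unfold pvKmpSearch pvOcc
    rw [if_pos hm, if_pos hpe]
  · have hm' : 0 < p.length := by omega
    unfold pvKmpSearch
    rw [if_neg hm]
    show ((List.range t.length).foldl
      (fun (st : List Int × Nat) i =>
        let c := t.getD i ' '
        let j1 := pvJump c p (pvPrefix p) st.2 st.2
        let j2 := if c = p.getD j1 ' ' then j1 + 1 else j1
        if j2 = p.length then (st.1 ++ [(i : Int) - p.length + 1], (pvPrefix p).getD (p.length - 1) 0)
        else (st.1, j2))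
      ([], 0)).1 = pvOcc t p
    rw [search_fold hm' t.length le_rfl]
    exact kmp_list_eq_occ hm'

lemma occ_pairwise (t p : List Char) : (pvOcc t p).Pairwise (· ≤ ·) := by
  unfold pvOcc
  split
  · exact (PySem.List.pairwise_lt_pyRange_one _ _).imp le_of_lt
  · exact ((PySem.List.pairwise_lt_pyRange_one _ _).sublist List.filter_sublist).imp le_of_lt

-- the two-pointer merge over two ascending lists keeps exactly the x with a y within distance k
lemma mergeF_eq (k : Int) :
    ∀ (fuel : Nat) (xs ys : List Int), xs.length + ys.length ≤ fuel →
    xs.Pairwise (· ≤ ·) → ys.Pairwise (· ≤ ·) →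
    pvMergeF k fuel xs ys = xs.filter (fun x => ys.any (fun y => decide (|x - y| ≤ k))) := by
  intro fuel
  induction fuel with
  | zero =>
    intro xs ys hlen _ _
    match xs, ys with
    | [], ys => simp [pvMergeF]
    | x :: xs, [] => simp [pvMergeF]
    | x :: xs, y :: ys => simp at hlen
  | succ f ih =>
    intro xs ys hlen hx hy
    match xs, ys with
    | [], ys => simp [pvMergeF]
    | x :: xs, [] => simp [pvMergeF]
    | x :: xs, y :: ys =>
      obtain ⟨hx1, hx2⟩ := List.pairwise_cons.mp hx
      obtain ⟨hy1, hy2⟩ := List.pairwise_cons.mp hy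
      simp only [pvMergeF]
      by_cases h1 : |x - y| ≤ k
      · rw [if_pos h1, ih xs (y :: ys) (by simp at hlen ⊢; omega) hx2 hy]
        rw [List.filter_cons_of_pos (by simp; exact Or.inl h1)]
      · rw [if_neg h1]
        by_cases h2 : y - x > k
        · rw [if_pos h2, ih xs (y :: ys) (by simp at hlen ⊢; omega) hx2 hy]
          rw [List.filter_cons_of_neg]
          intro hcon
          rw [List.any_eq_true] at hcon
          obtain ⟨y', hy', hdec⟩ := hcon
          rw [decide_eq_true_eq] at hdec
          have hyy : y ≤ y' := by
            rcases List.mem_cons.mp hy' with h | h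
            · omega
            · exact hy1 y' h
          have habs : -(x - y') ≤ |x - y'| := neg_le_abs _
          omega
        · rw [if_neg h2, ih (x :: xs) ys (by simp at hlen ⊢; omega) hx hy2]
          have h3 : x - y > k := by
            rcases abs_cases (x - y) with ⟨he, _⟩ | ⟨he, _⟩ <;> omega
          refine (List.filter_congr ?_).symm
          intro a ha
          have hxa : x ≤ a := by
            rcases List.mem_cons.mp ha with h | h
            · omega
            · exact hx1 a h
          simp only [List.any_cons]
          have : ¬ |a - y| ≤ k := by
            have : a - y ≤ |a - y| := le_abs_self _
            omega
          simp [this]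

lemma merge_eq {k : Int} {xs ys : List Int} (hx : xs.Pairwise (· ≤ ·)) (hy : ys.Pairwise (· ≤ ·)) :
    pvMerge k xs ys = xs.filter (fun x => ys.any (fun y => decide (|x - y| ≤ k))) :=
  mergeF_eq k _ xs ys le_rfl hx hy

-- ===== VERDICT (by name: the statement is the Claim_ definition above) =====
theorem beautifulIndices2_spec : Claim_equal_beautifulIndices2 := by
  intro s a b k _
  unfold Spec_beautifulIndices2 beautifulIndices2 beautifulIndices2_alt
  rw [kmp_eq_occ, kmp_eq_occ]
  exact merge_eq (occ_pairwise _ _) (occ_pairwise _ _)
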